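-- pv_equiv track=rewrite | github.com/an3iitho/deis | api/tests/container.py | get_allocations
-- ===== SOURCE A (Python) =====
-- def get_allocations(container_dict):
--     counts = {}
--     for container in container_dict.values():
--         name, id = container.split(':')
--         if name in counts:
--             counts[name] += 1
--         else:
--             counts[name] = 1
--     return sorted(counts.values())
-- ===== SOURCE B (Python) =====
-- def get_allocations(container_dict):
--     names = []
--     for container in container_dict.values():
--         name, id = container.split(':')
--         names.append(name)
--     names.sort()
--     counts = []
--     i = 0
--     while i < len(names):
--         j = i
--         while j < len(names) and names[j] == names[i]:
--             j += 1
--         counts.append(j - i)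
--         i = j
--     return sorted(counts)
-- ===== Notes on version B (the rewrite author's own statement) =====
-- stated objective: alternative
-- what changed: B replaces A's hash-counter dict by a sort-and-group algorithm: it collects the names into a list, sorts it, and scans it with two indices measuring the length of each consecutive run of equal names; the run lengths are the per-name counts, sorted at the end.
import Mathlib
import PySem

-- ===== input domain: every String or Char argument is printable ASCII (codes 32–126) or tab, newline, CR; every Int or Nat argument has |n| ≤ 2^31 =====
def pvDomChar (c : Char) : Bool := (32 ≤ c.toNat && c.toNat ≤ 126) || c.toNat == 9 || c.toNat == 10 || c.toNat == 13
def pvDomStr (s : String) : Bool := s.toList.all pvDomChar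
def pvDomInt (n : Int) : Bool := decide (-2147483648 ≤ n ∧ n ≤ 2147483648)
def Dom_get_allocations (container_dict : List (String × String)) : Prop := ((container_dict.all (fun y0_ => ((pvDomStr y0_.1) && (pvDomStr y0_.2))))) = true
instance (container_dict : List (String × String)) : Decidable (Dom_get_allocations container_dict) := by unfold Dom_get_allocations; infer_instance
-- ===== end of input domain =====

-- B replaces A's hash-counter dict by sort-and-group: sort the names, scan consecutive runs, sort the run lengths; return value only.

-- ===== PORT A =====
def get_allocations (container_dict : List (String × String)) : List Int :=
  let counts : PySem.Dict String Int :=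
    (container_dict.map (·.2)).foldl (fun counts container =>
      match PySem.Str.split? container ":" with
      | some [name, _id] =>
          if counts.contains name then counts.modify name 0 (· + 1)
          else counts.insert name 1
      | _ => counts) PySem.Dict.empty
  PySem.List.sorted counts.values (fun x => x) false

-- ===== PORT B =====
-- the name from one container string ('name, id = container.split(':')'), if it splits in two
def pvSplitName? (container : String) : Option String :=
  (PySem.Str.split? container ":").bind (fun parts =>
    if parts.length == 2 then parts.head? else none)

-- the inner while loop of B: length of each consecutive run of equal names in the sorted list
def pvRunLengths : List String → List Int
  | [] => []
  | x :: xs =>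
      ((xs.takeWhile (· == x)).length + 1 : Int) :: pvRunLengths (xs.dropWhile (· == x))
  termination_by ss => ss.length
  decreasing_by
    simp only [List.length_cons]
    exact Nat.lt_succ_of_le (List.dropWhile_sublist _).length_le

def get_allocations_alt (container_dict : List (String × String)) : List Int :=
  let names : List String :=
    (container_dict.map (·.2)).foldl (fun acc container =>
      match pvSplitName? container with
      | some name => acc ++ [name]
      | none => acc) []
  let sortedNames := PySem.List.sorted names (fun x => x) false
  let counts := pvRunLengths sortedNames
  PySem.List.sorted counts (fun x => x) false

-- ===== PRECONDITION & SPEC =====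
-- Pre_ excludes exactly the inputs where a value does not contain exactly one ':', on which
-- Python's two-variable unpacking of container.split(':') raises ValueError in A (and in B alike).
def Pre_get_allocations (container_dict : List (String × String)) : Prop :=
  (container_dict.all (fun p => PySem.Str.count p.2 ":" == 1)) = true
instance (container_dict : List (String × String)) : Decidable (Pre_get_allocations container_dict) := by unfold Pre_get_allocations; infer_instance
def pvWitness_get_allocations : (List (String × String)) :=
  [("c1", "web:1"), ("c2", "web:2"), ("c3", "db:1")]

def Spec_get_allocations (container_dict : List (String × String)) (out : List Int) : Prop := out = get_allocations_alt container_dict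
instance (container_dict : List (String × String)) (out : List Int) : Decidable (Spec_get_allocations container_dict out) := by unfold Spec_get_allocations; infer_instance

-- ===== CLAIM (what is proved, stated in full; the proofs are below) =====
def Claim_equal_get_allocations : Prop := ∀ (container_dict : List (String × String)), Dom_get_allocations container_dict → Pre_get_allocations container_dict → Spec_get_allocations container_dict (get_allocations container_dict)

-- ===== LEMMAS AND PROOFS =====

-- B's name-collecting loop is a filterMap
theorem pvB_fold (l : List String) (acc : List String) :
    l.foldl (fun acc container =>
      match pvSplitName? container with
      | some name => acc ++ [name]
      | none => acc) acc = acc ++ l.filterMap pvSplitName? := by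
  induction l generalizing acc with
  | nil => simp
  | cons c l ih =>
      simp only [List.foldl_cons, List.filterMap_cons, ih]
      match h : pvSplitName? c with
      | some name => simp
      | none => simp

-- A's counting loop, re-indexed by the same filterMap
theorem pvA_fold (l : List String) (d : PySem.Dict String Int) :
    l.foldl (fun counts container =>
      match PySem.Str.split? container ":" with
      | some [name, _id] =>
          if counts.contains name then counts.modify name 0 (· + 1)
          else counts.insert name 1
      | _ => counts) d
    = (l.filterMap pvSplitName?).foldl (fun counts name =>
        if counts.contains name then counts.modify name 0 (· + 1)
        else counts.insert name 1) d := by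
  induction l generalizing d with
  | nil => simp
  | cons c l ih =>
      simp only [List.foldl_cons, List.filterMap_cons]
      match h : PySem.Str.split? c ":" with
      | some [name, _id] =>
          rw [show pvSplitName? c = some name by simp [pvSplitName?, h]]
          exact ih _
      | none => rw [show pvSplitName? c = none by simp [pvSplitName?, h]]; exact ih _
      | some [] => rw [show pvSplitName? c = none by simp [pvSplitName?, h]]; exact ih _
      | some [x] => rw [show pvSplitName? c = none by simp [pvSplitName?, h]]; exact ih _
      | some (x :: y :: z :: t) => rw [show pvSplitName? c = none by simp [pvSplitName?, h]]; exact ih _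

theorem pvStep_eq_modify (d : PySem.Dict String Int) (n : String) :
    (if d.contains n then d.modify n 0 (· + 1) else d.insert n 1)
      = d.modify n 0 (· + 1) := by
  by_cases h : d.contains n = true
  · simp [h]
  · simp only [Bool.not_eq_true] at h
    simp only [h, if_neg Bool.false_ne_true]
    apply PySem.Dict.ext
    simp [PySem.Dict.modify, PySem.Dict.insert, PySem.Dict.getD_of_not_contains _ _ h]

theorem pvCounts_eq_counter (ns : List String) :
    ns.foldl (fun counts name =>
        if counts.contains name then counts.modify name 0 (· + 1)
        else counts.insert name 1) PySem.Dict.empty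
      = PySem.Dict.counter ns := by
  rw [PySem.Dict.counter_eq_foldl]
  exact PySem.List.foldl_congr_mem _ _ _ _ (fun d n _ => pvStep_eq_modify d n)

theorem pvValues_counter (ns : List String) :
    (PySem.Dict.counter ns).values = (PySem.Set.ofList ns).map (fun k => (List.count k ns : Int)) := by
  show (PySem.Dict.counter ns).items.map (·.2) = _
  rw [PySem.Dict.items_counter, List.map_map]
  rfl

-- adding a run of copies of x to the singleton set {x} leaves it unchanged
theorem pvUpdate_const (x : String) (t : List String) (ht : ∀ a ∈ t, a = x) :
    PySem.Set.update [x] t = [x] := by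
  induction t with
  | nil => rfl
  | cons a t ih =>
      rw [PySem.Set.update_cons, PySem.Set.add_of_mem (by simp [ht a (by simp)])]
      exact ih (fun b hb => ht b (by simp [hb]))

-- set(x :: run-of-x ++ rest) = x :: set(rest) when x does not occur in rest
theorem pvOfList_run (x : String) (t d : List String) (ht : ∀ a ∈ t, a = x) (hd : x ∉ d) :
    PySem.Set.ofList (x :: t ++ d) = x :: PySem.Set.ofList d := by
  have h1 : PySem.Set.ofList (x :: t ++ d) = PySem.Set.update (PySem.Set.update PySem.Set.empty (x :: t)) d := by
    rw [← PySem.Set.update_empty, ← PySem.Set.update_append]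
  have h2 : PySem.Set.update PySem.Set.empty (x :: t) = [x] := by
    rw [PySem.Set.update_cons]
    exact pvUpdate_const x t ht
  rw [h1, h2, PySem.Set.update_eq_append_filter]
  have h3 : (PySem.Set.ofList d).filter (fun y => !(PySem.Set.contains [x] y)) = PySem.Set.ofList d := by
    apply List.filter_eq_self.2
    intro a ha
    have : a ≠ x := fun h => hd (h ▸ ((PySem.Set.mem_ofList _ _).1 ha))
    simp [PySem.Set.contains, this]
  rw [h3]; rfl

-- in a sorted list, everything after the leading run of x differs from x
theorem pvDropWhile_ne (x : String) (xs : List String)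
    (h : (x :: xs).Pairwise (· ≤ ·)) :
    ∀ a ∈ xs.dropWhile (· == x), a ≠ x := by
  intro a ha
  rcases hDD : xs.dropWhile (· == x) with _ | ⟨y, d'⟩
  · rw [hDD] at ha; simp at ha
  · rw [hDD] at ha
    have hy : (y == x) = false := by
      have hne : xs.dropWhile (· == x) ≠ [] := by rw [hDD]; simp
      have := List.head_dropWhile_not (fun a => a == x) hne
      simpa [hDD] using this
    have hyx : y ≠ x := by simpa using hy
    have hxle : ∀ b ∈ xs, x ≤ b := (List.pairwise_cons.1 h).1
    have hymem : y ∈ xs := (List.dropWhile_sublist _).mem (by rw [hDD]; simp)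
    have hxy : x < y := lt_of_le_of_ne (hxle y hymem) (Ne.symm hyx)
    have hpd : (y :: d').Pairwise (fun a b => a ≤ b) := by
      rw [← hDD]
      exact ((List.pairwise_cons.1 h).2).sublist (List.dropWhile_sublist _)
    rcases List.mem_cons.1 ha with rfl | ha'
    · exact hyx
    · have hle : y ≤ a := (List.pairwise_cons.1 hpd).1 a ha'
      exact fun hax => absurd (hax ▸ hle) (not_le.2 hxy)

-- on a sorted list, the run lengths are exactly the per-name counts, keyed by first occurrence
theorem pvRunLengths_eq (ss : List String) (h : ss.Pairwise (· ≤ ·)) :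
    pvRunLengths ss = (PySem.List.dedup ss).map (fun k => (List.count k ss : Int)) := by
  induction ss using pvRunLengths.induct with
  | case1 => simp [pvRunLengths]
  | case2 x xs ih =>
      set t := xs.takeWhile (· == x) with hT
      set d := xs.dropWhile (· == x) with hD
      have hxs : t ++ d = xs := List.takeWhile_append_dropWhile
      have ht : ∀ a ∈ t, a = x := fun a ha => by
        have := List.mem_takeWhile_imp ha; simpa using this
      have hd : ∀ a ∈ d, a ≠ x := pvDropWhile_ne x xs h
      have hxd : x ∉ d := fun hx => hd x hx rfl
      have hpd : d.Pairwise (fun a b => a ≤ b) :=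
        ((List.pairwise_cons.1 h).2).sublist (List.dropWhile_sublist _)
      have hdedup : PySem.List.dedup (x :: xs) = x :: PySem.List.dedup d := by
        simp only [PySem.List.dedup_eq_ofList]
        rw [← hxs, ← List.cons_append]
        exact pvOfList_run x t d ht hxd
      have hcx : List.count x (x :: xs) = t.length + 1 := by
        rw [← hxs]
        have h1 : List.count x t = t.length := List.count_eq_length.2 (fun b hb => (ht b hb).symm)
        have h2 : List.count x d = 0 := List.count_eq_zero.2 hxd
        simp [h1, h2]
      have hck : ∀ k ∈ PySem.List.dedup d, List.count k (x :: xs) = List.count k d := by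
        intro k hk
        have hkd : k ∈ d := by simpa [PySem.List.dedup_eq_ofList, PySem.Set.mem_ofList] using hk
        have hkx : k ≠ x := hd k hkd
        have hkt : k ∉ t := fun hkt => hkx (ht k hkt)
        have hxk : x ≠ k := Ne.symm hkx
        rw [← hxs]
        simp [List.count_eq_zero.2 hkt, hxk]
      rw [pvRunLengths, hdedup, List.map_cons, ih hpd]
      congr 1
      · rw [← hT, hcx]; push_cast; ring
      · exact (List.map_congr_left (fun k hk => by rw [hck k hk])).symm

-- ===== VERDICT (by name: the statement is the Claim_ definition above) =====
theorem get_allocations_spec : Claim_equal_get_allocations := by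
  intro container_dict _ _
  unfold Spec_get_allocations get_allocations get_allocations_alt
  rw [pvA_fold, pvB_fold, pvCounts_eq_counter, List.nil_append]
  simp only []
  set ns := (container_dict.map (·.2)).filterMap pvSplitName? with hns
  set ss := PySem.List.sorted ns (fun x => x) false with hss
  have hperm : ss.Perm ns := PySem.List.sorted_perm ns (fun x => x) false
  have hpair : ss.Pairwise (· ≤ ·) := by
    have := PySem.List.sorted_pairwise ns (fun x => x)
    simpa using this
  rw [pvValues_counter, pvRunLengths_eq ss hpair]
  apply (PySem.List.sorted_id_eq_sorted_id_iff_perm _ _).2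
  have hsets : (PySem.Set.ofList ns).Perm (PySem.Set.ofList ss) := by
    refine (List.perm_ext_iff_of_nodup (PySem.Set.nodup_ofList _) (PySem.Set.nodup_ofList _)).2 ?_
    intro a
    simp only [PySem.Set.mem_ofList]
    exact ⟨fun h => (hperm.mem_iff).2 h, fun h => (hperm.mem_iff).1 h⟩
  have hmap : (PySem.List.dedup ss).map (fun k => (List.count k ss : Int))
      = (PySem.Set.ofList ss).map (fun k => (List.count k ns : Int)) := by
    simp only [PySem.List.dedup_eq_ofList]
    exact List.map_congr_left (fun k _ => by rw [hperm.count_eq k])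
  rw [hmap]
  exact hsets.map _
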